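-- pv_equiv track=rewrite | github.com/Nihrin/AoC | 2024/Day 02/2.py | second_check
-- ===== SOURCE A (Python) =====
-- import copy
--
-- def is_descending(line):
--     for i in range(len(line)-1):
--         if (line[i] <= line[i+1]):
--             return False
--     return True
--
-- def is_ascending(line):
--     for i in range(len(line)-1):
--         if (line[i] >= line[i+1]):
--             return False
--     return True
--
-- def descending_or_ascending(line):
--     if not (is_descending(line) or is_ascending(line)):
--         return False
--     return True
--
-- def second_rule(line):
--     for i in range(len(line)-1):
--         difference = abs(line[i] - line[i+1])
--         if (difference > 3):
--             return False
--     return True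
--
-- def line_is_valid(line):
--     if not (second_rule(line) and descending_or_ascending(line)):
--         return False
--     return True
--
-- def second_check(data):
--     counter = 0
--     for line in data:
--         for i in range(len(line)):
--             new_line = copy.deepcopy(line)
--             new_line.pop(i)
--             if line_is_valid(new_line):
--                 counter += 1
--                 break
--     return counter
-- ===== SOURCE B (Python) =====
-- def second_check(data):
--     def chain_ok(l, ok):
--         return all(ok(l[k], l[k + 1]) for k in range(len(l) - 1))
--
--     def damp(line, ok):
--         n = len(line)
--         j = next((k for k in range(n - 1) if not ok(line[k], line[k + 1])), None)
--         if j is None: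
--             return n > 0
--         return chain_ok(line[:j] + line[j + 1:], ok) or \
--                chain_ok(line[:j + 1] + line[j + 2:], ok)
--
--     asc = lambda a, b: a < b <= a + 3
--     desc = lambda a, b: b < a <= b + 3
--     return sum(1 for line in data if damp(line, asc) or damp(line, desc))
-- ===== Notes on version B (the rewrite author's own statement) =====
-- stated objective: faster
-- what changed: A tries every single-element removal and re-validates the whole line each time (O(L^2) per line); B, per direction, finds the first bad adjacent pair and tests only the two removals that can repair it, each with one linear scan (O(L) per line).
import Mathlib
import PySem

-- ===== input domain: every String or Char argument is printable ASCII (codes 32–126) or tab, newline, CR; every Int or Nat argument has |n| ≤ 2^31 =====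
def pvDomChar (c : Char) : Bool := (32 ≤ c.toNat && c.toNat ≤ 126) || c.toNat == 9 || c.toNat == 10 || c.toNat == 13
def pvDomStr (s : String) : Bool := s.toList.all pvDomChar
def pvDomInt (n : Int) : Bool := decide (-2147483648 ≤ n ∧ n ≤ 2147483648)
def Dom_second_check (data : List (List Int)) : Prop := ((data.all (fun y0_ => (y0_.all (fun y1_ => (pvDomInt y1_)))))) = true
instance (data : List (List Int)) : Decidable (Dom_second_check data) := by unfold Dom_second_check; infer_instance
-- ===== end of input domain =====

-- B replaces A's brute force (try every single-element removal, O(L^2) per line) by an O(L)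
-- check per direction: locate the first bad adjacent pair and test only the two removals
-- that can repair it (equal return value; proved below).

-- ===== PORT A =====
def is_descending (line : List Int) : Bool :=
  (List.range (line.length - 1)).all fun i =>
    !decide (line.getD i 0 ≤ line.getD (i + 1) 0)

def is_ascending (line : List Int) : Bool :=
  (List.range (line.length - 1)).all fun i =>
    !decide (line.getD i 0 ≥ line.getD (i + 1) 0)

def descending_or_ascending (line : List Int) : Bool :=
  is_descending line || is_ascending line

def second_rule (line : List Int) : Bool :=
  (List.range (line.length - 1)).all fun i =>
    !decide (|line.getD i 0 - line.getD (i + 1) 0| > 3)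

def line_is_valid (line : List Int) : Bool :=
  second_rule line && descending_or_ascending line

-- inner 'for i in range(len(line)) … break': counts the line once if some removal is valid
def second_check (data : List (List Int)) : Int :=
  data.foldl (fun counter line =>
    if (List.range line.length).any (fun i => line_is_valid (line.eraseIdx i)) then
      counter + 1
    else counter) 0

-- ===== PORT B =====
def chain_ok (ok : Int → Int → Bool) (l : List Int) : Bool :=
  (List.range (l.length - 1)).all fun k => ok (l.getD k 0) (l.getD (k + 1) 0)

def damp (ok : Int → Int → Bool) (line : List Int) : Bool :=
  match (List.range (line.length - 1)).find?
      (fun k => !ok (line.getD k 0) (line.getD (k + 1) 0)) with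
  | none => decide (line.length > 0)
  | some j =>
      chain_ok ok (line.take j ++ line.drop (j + 1)) ||
      chain_ok ok (line.take (j + 1) ++ line.drop (j + 2))

def okAsc (a b : Int) : Bool := decide (a < b) && decide (b ≤ a + 3)

def okDesc (a b : Int) : Bool := decide (b < a) && decide (a ≤ b + 3)

def second_check_alt (data : List (List Int)) : Int :=
  data.foldl (fun counter line =>
    if damp okAsc line || damp okDesc line then counter + 1 else counter) 0

-- ===== PRECONDITION & SPEC =====
def Spec_second_check (data : List (List Int)) (out : Int) : Prop := out = second_check_alt data
instance (data : List (List Int)) (out : Int) : Decidable (Spec_second_check data out) := by unfold Spec_second_check; infer_instance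

-- ===== CLAIM (what is proved, stated in full; the proofs are below) =====
def Claim_equal_second_check : Prop := ∀ (data : List (List Int)), Dom_second_check data → Spec_second_check data (second_check data)

-- ===== LEMMAS AND PROOFS =====

-- pointwise characterisation of chain_ok
lemma chain_ok_iff (ok : Int → Int → Bool) (l : List Int) :
    chain_ok ok l = true ↔ ∀ k, k + 1 < l.length → ok (l.getD k 0) (l.getD (k + 1) 0) = true := by
  simp only [chain_ok, List.all_eq_true, List.mem_range]
  constructor
  · intro h k hk; exact h k (by omega)
  · intro h k hk; exact h k (by omega)

lemma getD_eraseIdx (l : List Int) (i k : Nat) (hi : i < l.length) (hk : k < l.length - 1) :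
    (l.eraseIdx i).getD k 0 = if k < i then l.getD k 0 else l.getD (k + 1) 0 := by
  have hlen : (l.eraseIdx i).length = l.length - 1 := by
    rw [List.length_eraseIdx, if_pos hi]
  rw [List.getD_eq_getElem (l.eraseIdx i) 0 (by omega), List.getElem_eraseIdx]
  split
  · rw [List.getD_eq_getElem l 0 (by omega)]
  · rw [List.getD_eq_getElem l 0 (by omega)]

lemma length_eraseIdx_lt (l : List Int) (i : Nat) (hi : i < l.length) :
    (l.eraseIdx i).length = l.length - 1 := by
  rw [List.length_eraseIdx, if_pos hi]

-- the heart of B: trying only the two candidates around the first bad pair is complete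
lemma damp_iff (ok : Int → Int → Bool) (line : List Int) :
    damp ok line = true ↔ ∃ i < line.length, chain_ok ok (line.eraseIdx i) = true := by
  unfold damp
  cases hfind : (List.range (line.length - 1)).find?
      (fun k => !ok (line.getD k 0) (line.getD (k + 1) 0)) with
  | none =>
    rw [List.find?_eq_none] at hfind
    have hall : ∀ k, k + 1 < line.length → ok (line.getD k 0) (line.getD (k + 1) 0) = true := by
      intro k hk
      have := hfind k (List.mem_range.mpr (by omega))
      simpa using this
    simp only [decide_eq_true_eq]
    constructor
    · intro hn
      refine ⟨line.length - 1, by omega, ?_⟩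
      rw [chain_ok_iff]
      intro k hk
      have hlen := length_eraseIdx_lt line (line.length - 1) (by omega)
      rw [hlen] at hk
      rw [getD_eraseIdx line _ k (by omega) (by omega),
          if_pos (by omega), getD_eraseIdx line _ (k + 1) (by omega) (by omega),
          if_pos (by omega)]
      exact hall k (by omega)
    · rintro ⟨i, hi, _⟩; omega
  | some j =>
    have hjmem := List.mem_range.mp (List.mem_of_find?_eq_some hfind)
    have hjbad : ok (line.getD j 0) (line.getD (j + 1) 0) = false := by
      have := List.find?_some hfind
      simpa using this
    dsimp only
    rw [← List.eraseIdx_eq_take_drop_succ line j,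
        show List.take (j + 1) line ++ List.drop (j + 2) line = line.eraseIdx (j + 1) from
          (List.eraseIdx_eq_take_drop_succ line (j + 1)).symm]
    rw [Bool.or_eq_true]
    constructor
    · rintro (h | h)
      · exact ⟨j, by omega, h⟩
      · exact ⟨j + 1, by omega, h⟩
    · rintro ⟨i, hi, hok⟩
      rcases Nat.lt_or_ge i j with hij | hij
      · -- i < j : the bad pair survives at positions (j-1, j); contradiction
        exfalso
        rw [chain_ok_iff] at hok
        have hlen := length_eraseIdx_lt line i hi
        have h1 := hok (j - 1) (by omega)
        have hj1 : j - 1 + 1 = j := by omega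
        rw [hj1, getD_eraseIdx line i (j - 1) hi (by omega),
            getD_eraseIdx line i j hi (by omega),
            if_neg (by omega), if_neg (by omega), hj1] at h1
        rw [hjbad] at h1; exact Bool.false_ne_true h1
      · rcases Nat.lt_or_ge (j + 1) i with hij2 | hij2
        · -- i > j + 1 : the bad pair survives at positions (j, j+1); contradiction
          exfalso
          rw [chain_ok_iff] at hok
          have hlen := length_eraseIdx_lt line i hi
          have h1 := hok j (by omega)
          rw [getD_eraseIdx line i j hi (by omega), if_pos (by omega),
              getD_eraseIdx line i (j + 1) hi (by omega), if_pos (by omega)] at h1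
          rw [hjbad] at h1; exact Bool.false_ne_true h1
        · -- i = j or i = j + 1
          rcases Nat.eq_or_lt_of_le hij with h | h
          · left; rw [h]; exact hok
          · right
            have hji : j + 1 = i := by omega
            rw [hji]; exact hok

-- A's validity test splits into the two directed chain tests
lemma line_is_valid_eq (l : List Int) :
    line_is_valid l = (chain_ok okAsc l || chain_ok okDesc l) := by
  rw [Bool.eq_iff_iff]
  simp only [line_is_valid, second_rule, descending_or_ascending, is_descending, is_ascending,
    chain_ok, okAsc, okDesc, Bool.and_eq_true, Bool.or_eq_true, List.all_eq_true,
    List.mem_range, Bool.not_eq_eq_eq_not, Bool.not_true, decide_eq_false_iff_not, not_le,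
    not_lt, decide_eq_true_eq, abs_le]
  constructor
  · rintro ⟨hr, hd | hd⟩
    · right; intro k hk
      obtain ⟨h1, h2⟩ := hr k hk
      exact ⟨hd k hk, by omega⟩
    · left; intro k hk
      obtain ⟨h1, h2⟩ := hr k hk
      exact ⟨hd k hk, by omega⟩
  · rintro (h | h)
    · exact ⟨fun k hk => by have := h k hk; omega, Or.inr fun k hk => (h k hk).1⟩
    · exact ⟨fun k hk => by have := h k hk; omega, Or.inl fun k hk => (h k hk).1⟩

-- per line, A's removal search and B's damp test agree
lemma per_line (line : List Int) :
    ((List.range line.length).any fun i => line_is_valid (line.eraseIdx i)) =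
      (damp okAsc line || damp okDesc line) := by
  rw [Bool.eq_iff_iff]
  simp only [List.any_eq_true, List.mem_range, line_is_valid_eq, Bool.or_eq_true,
    damp_iff]
  constructor
  · rintro ⟨i, hi, h | h⟩
    · exact Or.inl ⟨i, hi, h⟩
    · exact Or.inr ⟨i, hi, h⟩
  · rintro (⟨i, hi, h⟩ | ⟨i, hi, h⟩)
    · exact ⟨i, hi, Or.inl h⟩
    · exact ⟨i, hi, Or.inr h⟩

lemma fold_eq (data : List (List Int)) (c : Int) :
    data.foldl (fun counter line =>
      if (List.range line.length).any (fun i => line_is_valid (line.eraseIdx i)) then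
        counter + 1
      else counter) c =
    data.foldl (fun counter line =>
      if damp okAsc line || damp okDesc line then counter + 1 else counter) c := by
  simp only [per_line]

-- ===== VERDICT (by name: the statement is the Claim_ definition above) =====
theorem second_check_spec : Claim_equal_second_check := by
  intro data _
  unfold Spec_second_check second_check second_check_alt
  exact fold_eq data 0
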